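-- pv_equiv track=rewrite | github.com/uumar421/Burrows-Wheeler-Aligner- | BWA.py | character_position
-- ===== SOURCE A (Python) =====
-- def character_position(str1,index):
--     List=[]
--     for x in range(index[0],index[1]):
--         a=str1[x]
--         count=0
--         for i,c in enumerate(str1):
--             if i<x:
--                 if c==a:
--                     count+=1
--         List.append(count)
--     return List
-- ===== SOURCE B (Python) =====
-- def character_position(str1, index):
--     lo, hi = index[0], index[1]
--     if lo >= hi:
--         return []
--     counts = {}
--     ranks = []
--     for c in str1[:hi]:
--         r = counts.get(c, 0)
--         ranks.append(r)
--         counts[c] = r + 1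
--     return ranks[lo:hi]
-- ===== Notes on version B (the rewrite author's own statement) =====
-- stated objective: alternative
-- what changed: Replaces the per-position rescan of the whole string by one pass over the needed prefix maintaining a running per-character count dict (prefix ranks), answering the range by slicing the rank list.
-- outside the precondition, e.g. on character_position('aa', [-1, 1]): A returns [0, 0], B returns [0]
import Mathlib
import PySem

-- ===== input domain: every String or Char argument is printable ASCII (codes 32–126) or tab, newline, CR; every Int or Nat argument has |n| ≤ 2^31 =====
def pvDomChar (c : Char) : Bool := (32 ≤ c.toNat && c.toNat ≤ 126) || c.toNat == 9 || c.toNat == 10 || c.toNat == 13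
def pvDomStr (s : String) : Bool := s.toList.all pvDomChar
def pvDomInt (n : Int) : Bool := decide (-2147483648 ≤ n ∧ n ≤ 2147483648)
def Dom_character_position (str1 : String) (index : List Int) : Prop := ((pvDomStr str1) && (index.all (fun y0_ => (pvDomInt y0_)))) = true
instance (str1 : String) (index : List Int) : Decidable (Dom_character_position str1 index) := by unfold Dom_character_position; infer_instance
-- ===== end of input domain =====

-- B replaces A's per-position rescan of the whole string by one pass over the needed
-- prefix maintaining a running per-character count dict (objective: alternative).

-- ===== PORT A =====
def character_position (str1 : String) (index : List Int) : List Int :=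
  match PySem.List.pyGet? index 0, PySem.List.pyGet? index 1 with
  | some i0, some i1 =>
      (PySem.List.pyRange i0 i1 1).foldl (fun L x =>
        -- a = str1[x]; exact under Pre_ (IndexError inputs are excluded there)
        let a := PySem.List.pyGetD str1.toList x ' '
        let count : Int := (PySem.List.enumerate str1.toList 0).foldl
          (fun cnt p => if p.1 < x then (if p.2 == a then cnt + 1 else cnt) else cnt) 0
        L ++ [count]) []
  | _, _ => []            -- index[0]/index[1] missing = Python IndexError; excluded by Pre_

-- ===== PORT B =====
def character_position_alt (str1 : String) (index : List Int) : List Int :=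
  match PySem.List.pyGet? index 0 with
  | none => []          -- index[0] missing = Python IndexError; excluded by Pre_
  | some lo =>
      match PySem.List.pyGet? index 1 with
      | none => []      -- index[1] missing = Python IndexError; excluded by Pre_
      | some hi =>
          if lo ≥ hi then []
          else
            let ranks : List Int :=
              ((PySem.List.slice str1.toList none (some hi)).foldl
                (fun (st : PySem.Dict Char Int × List Int) c =>
                  let r := st.1.getD c 0
                  (st.1.insert c (r + 1), st.2 ++ [r]))
                (PySem.Dict.empty, [])).2
            PySem.List.slice ranks (some lo) (some hi)

-- ===== PRECONDITION & SPEC =====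
-- Pre_ excludes inputs where A raises IndexError (index shorter than 2, or a position of the
-- range outside the string), and additionally excludes NEGATIVE in-range positions, on which
-- A's constant 0 and B's wrapped prefix rank are both accidental readings of Python's
-- negative-index wraparound and neither is specified.
def Pre_character_position (str1 : String) (index : List Int) : Prop :=
  2 ≤ index.length ∧
  (index.getD 0 0 < index.getD 1 0 →
    0 ≤ index.getD 0 0 ∧ index.getD 1 0 ≤ (str1.toList.length : Int))
instance (str1 : String) (index : List Int) : Decidable (Pre_character_position str1 index) := by
  unfold Pre_character_position; infer_instance
def pvWitness_character_position : String × List Int := ("abracadabra", [2, 8])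
def Spec_character_position (str1 : String) (index : List Int) (out : List Int) : Prop := out = character_position_alt str1 index
instance (str1 : String) (index : List Int) (out : List Int) : Decidable (Spec_character_position str1 index out) := by unfold Spec_character_position; infer_instance

-- ===== CLAIM (what is proved, stated in full; the proofs are below) =====
def Claim_equal_character_position : Prop := ∀ (str1 : String) (index : List Int), Dom_character_position str1 index → Pre_character_position str1 index → Spec_character_position str1 index (character_position str1 index)

-- ===== LEMMAS AND PROOFS =====

-- the prefix ranks B computes, specified structurally: position-by-position count in the prefix
def pvRanksFrom (p : List Char) : List Char → List Int
  | [] => []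
  | c :: l => (p.count c : Int) :: pvRanksFrom (p ++ [c]) l

-- B's fold produces exactly pvRanksFrom, given a dict holding the counts of the processed prefix
lemma pvFoldB (l : List Char) : ∀ (p : List Char) (d : PySem.Dict Char Int) (acc : List Int),
    (∀ c, d.getD c 0 = (p.count c : Int)) →
    (l.foldl (fun (st : PySem.Dict Char Int × List Int) c =>
        let r := st.1.getD c 0
        (st.1.insert c (r + 1), st.2 ++ [r])) (d, acc)).2
      = acc ++ pvRanksFrom p l := by
  induction l with
  | nil => intro p d acc _; simp [pvRanksFrom]
  | cons c l ih =>
      intro p d acc hd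
      have hd' : ∀ c', (d.insert c (d.getD c 0 + 1)).getD c' 0 = ((p ++ [c]).count c' : Int) := by
        intro c'
        by_cases hc : c' = c
        · subst hc
          rw [PySem.Dict.getD_insert_self, hd _]
          simp [List.count_append]
        · rw [PySem.Dict.getD_insert_of_ne d (d.getD c 0 + 1) 0 hc, hd c']
          simp [List.count_append]
          exact List.count_eq_zero.2 (by simp [hc])
      have h := ih (p ++ [c]) (d.insert c (d.getD c 0 + 1)) (acc ++ [d.getD c 0]) hd'
      simpa [pvRanksFrom, hd c, List.foldl_cons] using h

lemma pvRanksFrom_length (p l' : List Char) : (pvRanksFrom p l').length = l'.length := by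
  induction l' generalizing p with
  | nil => simp [pvRanksFrom]
  | cons c l ih => simp [pvRanksFrom, ih]

lemma pvRanksFrom_take (l' : List Char) : ∀ (p : List Char) (m : Nat),
    pvRanksFrom p (l'.take m) = (pvRanksFrom p l').take m := by
  induction l' with
  | nil => intro p m; simp [pvRanksFrom]
  | cons c l ih =>
      intro p m
      cases m with
      | zero => simp [pvRanksFrom]
      | succ m => simp [pvRanksFrom, List.take_succ_cons, ih]

lemma pvRanksFrom_get (l : List Char) : ∀ (p : List Char) (k : Nat) (hk : k < l.length),
    (pvRanksFrom p l)[k]? = some (((p ++ l.take k).count l[k] : Nat) : Int) := by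
  induction l with
  | nil => intro p k hk; simp at hk
  | cons c l ih =>
      intro p k hk
      cases k with
      | zero => simp [pvRanksFrom]
      | succ k =>
          have := ih (p ++ [c]) k (by simpa using hk)
          simpa [pvRanksFrom, List.append_assoc] using this

-- A's inner enumerate loop counts a in the first (x - s) characters
lemma pvInnerA (a : Char) (x : Int) (l : List Char) : ∀ (s cnt : Int),
    (PySem.List.enumerate l s).foldl
        (fun cnt p => if p.1 < x then (if p.2 == a then cnt + 1 else cnt) else cnt) cnt
      = cnt + ((l.take (x - s).toNat).count a : Nat) := by
  induction l with
  | nil => intro s cnt; simp [PySem.List.enumerate_nil]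
  | cons c l ih =>
      intro s cnt
      rw [PySem.List.enumerate_cons, List.foldl_cons]
      by_cases hs : s < x
      · have htake : (x - s).toNat = (x - (s + 1)).toNat + 1 := by omega
        rw [htake, List.take_succ_cons]
        by_cases hc : c == a
        · rw [if_pos hs, if_pos hc, ih (s + 1)]
          have : c = a := by simpa using hc
          subst this
          simp [List.count_cons_self]; ring
        · rw [if_pos hs, if_neg hc, ih (s + 1)]
          have : ¬ c = a := by simpa using hc
          simp [List.count_cons_of_ne this]
      · have h0 : (x - s).toNat = 0 := by omega
        have h1 : (x - (s + 1)).toNat = 0 := by omega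
        rw [if_neg hs, ih (s + 1), h0, h1]
        simp

-- ===== VERDICT (by name: the statement is the Claim_ definition above) =====
theorem character_position_spec : Claim_equal_character_position := by
  intro str1 index _ hpre
  unfold Spec_character_position character_position character_position_alt
  obtain ⟨hlen, hall⟩ := hpre
  match index, hlen with
  | i0 :: i1 :: rest, _ =>
    simp only [List.getD_cons_zero, List.getD_cons_succ] at hall
    rw [show PySem.List.pyGet? (i0 :: i1 :: rest) 0 = some i0 from by
          simp [PySem.List.pyGet?_zero_cons],
        show PySem.List.pyGet? (i0 :: i1 :: rest) 1 = some i1 from by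
          rw [PySem.List.pyGet?_of_nonneg_of_lt] <;> simp]
    dsimp only
    by_cases hle : i0 ≥ i1
    · rw [if_pos hle, PySem.List.pyRange_one_eq_nil (by omega)]
      simp
    · rw [if_neg hle]
      obtain ⟨hi0, hi1⟩ := hall (by omega)
      rw [PySem.List.foldl_append_singleton_eq_map]
      rw [PySem.List.slice_to str1.toList (by omega : (0:Int) ≤ i1)]
      rw [pvFoldB (str1.toList.take i1.toNat) [] PySem.Dict.empty [] (by intro c; simp)]
      simp only [List.nil_append]
      have hlenr : ((pvRanksFrom [] (str1.toList.take i1.toNat)).length : Int) = i1 := by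
        rw [pvRanksFrom_length, List.length_take]; omega
      rw [PySem.List.slice_toNat _ (by omega : (0:Int) ≤ i0) (by omega : (0:Int) ≤ i1)]
      have hdrop := PySem.List.map_pyGetD_pyRange'
        (pvRanksFrom [] (str1.toList.take i1.toNat)) (0 : Int) (a := i0) (by omega)
      rw [hlenr] at hdrop
      rw [← hdrop]
      rw [List.take_of_length_le (by
        simp only [List.length_map, PySem.List.length_pyRange_one]; omega)]
      apply List.map_congr_left
      intro x hx
      obtain ⟨hxlo, hxhi⟩ := (PySem.List.mem_pyRange_one).1 hx
      have hx0 : (0 : Int) ≤ x := by omega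
      have hxlt : x < (str1.toList.length : Int) := by omega
      have hxnat : x.toNat < str1.toList.length := by omega
      rw [PySem.List.pyGetD_eq_getElem str1.toList ' ' hx0 hxlt]
      rw [PySem.List.pyGetD_eq_getElem _ 0 hx0 (by rw [hlenr]; omega)]
      have hval : (pvRanksFrom [] (str1.toList.take i1.toNat))[x.toNat]?
          = some ((str1.toList.take x.toNat).count str1.toList[x.toNat] : Int) := by
        rw [pvRanksFrom_take, List.getElem?_take_of_lt (by omega)]
        simpa using pvRanksFrom_get str1.toList [] x.toNat hxnat
      rw [List.getElem?_eq_getElem (by rw [pvRanksFrom_length, List.length_take]; omega)] at hval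
      rw [Option.some.inj hval]
      rw [pvInnerA str1.toList[x.toNat] x str1.toList 0 0]
      simp
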